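-- pv_equiv track=rewrite | github.com/Symphoen1x/javaCollage | collage_sem_2/devcode/devsaitama3.py | hitungKorban
-- ===== SOURCE A (Python) =====
-- def hitungKorban(gambaran, kekuatan):
--     bangunan_hancur = kekuatan // 10  # Menghitung jumlah bangunan yang hancur
--     total_korban = 0
--     i = 0
--     buildings_destroyed = 0  # Menghitung jumlah bangunan yang telah dihancurkan
--
--     while i < len(gambaran) and buildings_destroyed < bangunan_hancur:
--         if gambaran[i] == 'b':
--             i += 1
--             jumlah_bangunan = 0
--             while i < len(gambaran) and gambaran[i].isdigit():
--                 jumlah_bangunan = jumlah_bangunan * 10 + int(gambaran[i])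
--                 i += 1
--
--             if i < len(gambaran) and gambaran[i] == 'm':
--                 i += 1
--                 jumlah_manusia = 0
--                 while i < len(gambaran) and gambaran[i].isdigit():
--                     jumlah_manusia = jumlah_manusia * 10 + int(gambaran[i])
--                     i += 1
--
--                 total_korban += jumlah_bangunan * jumlah_manusia
--                 buildings_destroyed += 1
--             else:
--                 continue
--         else:
--             i += 1
--
--     return total_korban
-- ===== SOURCE B (Python) =====
-- import re
--
-- def hitungKorban(gambaran, kekuatan):
--     limit = kekuatan // 10
--     total = 0
--     n = 0
--     for m in re.finditer(r'b(\d*)m(\d*)', gambaran, re.ASCII):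
--         if n >= limit:
--             break
--         total += int(m.group(1) or 0) * int(m.group(2) or 0)
--         n += 1
--     return total
-- ===== Notes on version B (the rewrite author's own statement) =====
-- stated objective: idiomatic
-- what changed: Replaced the hand-written index-scanning state machine (nested while loops with manual digit accumulation and a continue branch) by a single re.finditer(r'b(\d*)m(\d*)') loop that sums group products and stops after kekuatan//10 matches.
import Mathlib
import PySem

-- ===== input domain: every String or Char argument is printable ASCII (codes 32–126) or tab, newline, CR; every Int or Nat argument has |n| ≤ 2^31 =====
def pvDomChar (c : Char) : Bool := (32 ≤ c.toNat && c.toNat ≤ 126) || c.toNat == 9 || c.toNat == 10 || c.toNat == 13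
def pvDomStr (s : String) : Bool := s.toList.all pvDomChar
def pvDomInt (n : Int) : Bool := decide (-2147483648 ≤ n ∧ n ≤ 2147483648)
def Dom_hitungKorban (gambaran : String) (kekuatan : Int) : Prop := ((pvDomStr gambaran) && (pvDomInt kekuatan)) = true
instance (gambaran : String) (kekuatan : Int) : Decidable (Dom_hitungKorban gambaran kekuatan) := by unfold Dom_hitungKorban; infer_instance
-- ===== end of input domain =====

-- B replaces A's hand-written index state machine by a regex-match loop (re.finditer);
-- objective: idiomatic. Same return value; no mutation in either version.

-- ===== PORT A =====
-- int(gambaran[i]) for a char the loop has checked isdigit; exact on the ASCII domain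
def pvDigitVal (c : Char) : Int := (c.toNat : Int) - 48

-- the inner 'while i < len and gambaran[i].isdigit(): acc = acc*10 + int(...); i += 1' loops
-- (Python str.isdigit on a single char → PySem.Chars.isdigit, exact on the ASCII domain)
def pvDigitsA (cs : List Char) (i : Nat) (acc : Int) : Nat × Int :=
  if h : i < cs.length ∧ PySem.Chars.isdigit cs[i]! then
    pvDigitsA cs (i + 1) (acc * 10 + pvDigitVal cs[i]!)
  else
    (i, acc)
termination_by cs.length - i
decreasing_by omega

theorem pvDigitsA_ge (cs : List Char) (i : Nat) (acc : Int) : i ≤ (pvDigitsA cs i acc).1 := by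
  fun_induction pvDigitsA with
  | case1 i acc h ih => omega
  | case2 => simp

-- the outer while loop of A, with its continue branch
def pvLoopA (cs : List Char) (limit : Int) (i : Nat) (total destroyed : Int) : Int :=
  if h : i < cs.length ∧ destroyed < limit then
    if cs[i]! = 'b' then
      let r1 := pvDigitsA cs (i + 1) 0          -- jumlah_bangunan
      if r1.1 < cs.length ∧ cs[r1.1]! = 'm' then
        let r2 := pvDigitsA cs (r1.1 + 1) 0     -- jumlah_manusia
        pvLoopA cs limit r2.1 (total + r1.2 * r2.2) (destroyed + 1)
      else
        pvLoopA cs limit r1.1 total destroyed   -- continue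
    else
      pvLoopA cs limit (i + 1) total destroyed
  else
    total
termination_by cs.length - i
decreasing_by
  · have h1 := pvDigitsA_ge cs (i + 1) 0
    have h2 := pvDigitsA_ge cs ((pvDigitsA cs (i + 1) 0).1 + 1) 0
    omega
  · have h1 := pvDigitsA_ge cs (i + 1) 0
    omega
  · omega

def hitungKorban (gambaran : String) (kekuatan : Int) : Int :=
  pvLoopA gambaran.toList (PySem.Int.floordiv kekuatan 10) 0 0 0

-- ===== PORT B =====
-- int(m.group(k) or 0): the group is a run of ASCII digits, where int() is plain base-10
def pvIntOfDigits (ds : List Char) : Int :=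
  ds.foldl (fun a c => a * 10 + ((c.toNat : Int) - 48)) 0

-- the next non-overlapping match of r'b(\d*)m(\d*)' (\d under re.ASCII → PySem.Chars.isdigit):
-- its value int(g1 or 0) * int(g2 or 0) and the rest of the string after the match
def pvNextMatch (s : List Char) : Option (Int × List Char) :=
  match s with
  | [] => none
  | c :: rest =>
    if c = 'b' then
      match _h : rest.dropWhile PySem.Chars.isdigit with
      | 'm' :: rest2 =>
        some (pvIntOfDigits (rest.takeWhile PySem.Chars.isdigit) *
                pvIntOfDigits (rest2.takeWhile PySem.Chars.isdigit),
              rest2.dropWhile PySem.Chars.isdigit)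
      | _ => pvNextMatch rest    -- no match starting here; the engine retries at the next position
    else
      pvNextMatch rest

theorem pvNextMatch_rest_lt (s : List Char) (v : Int) (rest : List Char)
    (h : pvNextMatch s = some (v, rest)) : rest.length < s.length := by
  fun_induction pvNextMatch generalizing v rest with
  | case1 => simp at h
  | case2 tail rest2 hd =>
    obtain ⟨-, rfl⟩ := Prod.mk.injEq .. ▸ (Option.some.injEq .. ▸ h)
    have h1 : ('m' :: rest2).length ≤ tail.length := hd ▸ tail.length_dropWhile_le _
    have h2 : (rest2.dropWhile PySem.Chars.isdigit).length ≤ rest2.length :=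
      rest2.length_dropWhile_le _
    simp at h1 ⊢
    omega
  | case3 tail hnm ih =>
    have := ih v rest h
    simp
    omega
  | case4 c tail hb ih =>
    have := ih v rest h
    simp
    omega

-- the 'for m in re.finditer(...)' loop with the budget break
def pvLoopB (limit n total : Int) (s : List Char) : Int :=
  match _h : pvNextMatch s with
  | none => total
  | some (v, rest) =>
    if n ≥ limit then total
    else pvLoopB limit (n + 1) (total + v) rest
termination_by s.length
decreasing_by exact pvNextMatch_rest_lt s v rest _h

def hitungKorban_alt (gambaran : String) (kekuatan : Int) : Int :=
  pvLoopB (PySem.Int.floordiv kekuatan 10) 0 0 gambaran.toList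

-- ===== PRECONDITION & SPEC =====
def Spec_hitungKorban (gambaran : String) (kekuatan : Int) (out : Int) : Prop := out = hitungKorban_alt gambaran kekuatan
instance (gambaran : String) (kekuatan : Int) (out : Int) : Decidable (Spec_hitungKorban gambaran kekuatan out) := by unfold Spec_hitungKorban; infer_instance

-- ===== CLAIM (what is proved, stated in full; the proofs are below) =====
def Claim_equal_hitungKorban : Prop := ∀ (gambaran : String) (kekuatan : Int), Dom_hitungKorban gambaran kekuatan → Spec_hitungKorban gambaran kekuatan (hitungKorban gambaran kekuatan)

-- ===== LEMMAS AND PROOFS =====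

theorem pvDropWhile_eq_drop (l : List Char) (p : Char → Bool) :
    l.dropWhile p = l.drop (l.takeWhile p).length :=
  calc l.dropWhile p
      = (l.takeWhile p ++ l.dropWhile p).drop (l.takeWhile p).length := List.drop_left.symm
    _ = l.drop (l.takeWhile p).length := by rw [List.takeWhile_append_dropWhile]

-- A's digit loop computes the fold over the maximal digit run and stops right after it
theorem pvDigitsA_eq (cs : List Char) (i : Nat) (acc : Int) :
    pvDigitsA cs i acc =
      (i + ((cs.drop i).takeWhile PySem.Chars.isdigit).length,
       ((cs.drop i).takeWhile PySem.Chars.isdigit).foldl (fun a c => a * 10 + pvDigitVal c) acc) := by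
  fun_induction pvDigitsA with
  | case1 i acc h ih =>
    obtain ⟨hi, hdig⟩ := h
    have hdig' : PySem.Chars.isdigit cs[i] = true := by rwa [getElem!_pos cs i hi] at hdig
    rw [ih, List.drop_eq_getElem_cons hi, List.takeWhile_cons, if_pos hdig']
    simp [getElem!_pos, hi, Prod.ext_iff]
    omega
  | case2 i acc h =>
    by_cases hi : i < cs.length
    · have hdig : PySem.Chars.isdigit cs[i] = false := by
        have := fun hd => h ⟨hi, hd⟩
        rw [getElem!_pos cs i hi] at this
        exact Bool.not_eq_true _ ▸ this
      rw [List.drop_eq_getElem_cons hi, List.takeWhile_cons, if_neg (by simp [hdig])]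
      simp
    · rw [List.drop_eq_nil_of_le (by omega)]
      simp

theorem pvLoopB_unfold (limit n total : Int) (s : List Char) :
    pvLoopB limit n total s =
      match pvNextMatch s with
      | none => total
      | some (v, rest) => if n ≥ limit then total else pvLoopB limit (n + 1) (total + v) rest := by
  rw [pvLoopB]
  cases hm : pvNextMatch s with
  | none => simp
  | some p => cases p with | mk v rest => simp

theorem pvLoopB_of_none (limit n total : Int) (s : List Char) (h : pvNextMatch s = none) :
    pvLoopB limit n total s = total := by
  rw [pvLoopB_unfold, h]

theorem pvLoopB_of_some (limit n total : Int) (s : List Char) (v : Int) (rest : List Char)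
    (h : pvNextMatch s = some (v, rest)) :
    pvLoopB limit n total s
      = if n ≥ limit then total else pvLoopB limit (n + 1) (total + v) rest := by
  rw [pvLoopB_unfold, h]

-- pvLoopB looks only at pvNextMatch of its argument
theorem pvLoopB_congr (limit n total : Int) (s s' : List Char)
    (h : pvNextMatch s = pvNextMatch s') : pvLoopB limit n total s = pvLoopB limit n total s' := by
  rw [pvLoopB_unfold, pvLoopB_unfold, h]

theorem pvLoopB_stop (limit n total : Int) (s : List Char) (h : limit ≤ n) :
    pvLoopB limit n total s = total := by
  cases hm : pvNextMatch s with
  | none => exact pvLoopB_of_none _ _ _ _ hm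
  | some p =>
    cases p with
    | mk v rest => rw [pvLoopB_of_some _ _ _ _ _ _ hm, if_pos (by omega)]

theorem pvNextMatch_cons_not_b (c : Char) (t : List Char) (hc : c ≠ 'b') :
    pvNextMatch (c :: t) = pvNextMatch t := by
  rw [pvNextMatch]
  simp [hc]

theorem pvNextMatch_cons_b_m (t rest2 : List Char)
    (hd : t.dropWhile PySem.Chars.isdigit = 'm' :: rest2) :
    pvNextMatch ('b' :: t) =
      some (pvIntOfDigits (t.takeWhile PySem.Chars.isdigit) *
              pvIntOfDigits (rest2.takeWhile PySem.Chars.isdigit),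
            rest2.dropWhile PySem.Chars.isdigit) := by
  rw [pvNextMatch]
  rw [if_pos rfl]
  split
  · rename_i r2 heq
    rw [hd] at heq
    obtain ⟨rfl⟩ := (List.cons.injEq .. ▸ heq).2
    rfl
  · rename_i hne
    exact absurd hd (hne rest2)

theorem pvNextMatch_cons_b_not_m (t : List Char)
    (hd : ∀ r2, t.dropWhile PySem.Chars.isdigit ≠ 'm' :: r2) :
    pvNextMatch ('b' :: t) = pvNextMatch t := by
  rw [pvNextMatch]
  rw [if_pos rfl]
  split
  · rename_i r2 heq
    exact absurd heq (hd r2)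
  · rfl

-- skipping characters that are not 'b' does not change the next match
theorem pvNextMatch_skip (ds s : List Char) (h : ∀ c ∈ ds, c ≠ 'b') :
    pvNextMatch (ds ++ s) = pvNextMatch s := by
  induction ds with
  | nil => rfl
  | cons c t ih =>
    rw [List.cons_append, pvNextMatch_cons_not_b c (t ++ s) (h c (List.mem_cons_self ..)),
      ih (fun c hc => h c (List.mem_cons_of_mem _ hc))]

theorem pvIsdigit_ne_b (c : Char) (h : PySem.Chars.isdigit c = true) : c ≠ 'b' := by
  rintro rfl
  exact absurd h (by decide)

theorem pvLoop_eq (cs : List Char) (limit : Int) (i : Nat) (total d : Int) :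
    pvLoopA cs limit i total d = pvLoopB limit d total (cs.drop i) := by
  fun_induction pvLoopA with
  | case1 i total d h hb r1 hm r2 ih =>
    -- 'b' found, digits, 'm', digits: one regex match, budget consumed
    obtain ⟨hi, hd⟩ := h
    replace hm : (pvDigitsA cs (i + 1) 0).1 < cs.length
        ∧ cs[(pvDigitsA cs (i + 1) 0).1]! = 'm' := hm
    obtain ⟨hm1, hm2⟩ := hm
    rw [ih]
    have hb' : cs[i] = 'b' := by rwa [getElem!_pos cs i hi] at hb
    have e1 := pvDigitsA_eq cs (i + 1) 0
    have hdw : (cs.drop (i + 1)).dropWhile PySem.Chars.isdigit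
        = cs.drop ((pvDigitsA cs (i + 1) 0).1) := by
      rw [pvDropWhile_eq_drop, List.drop_drop, e1]
    have hm' : cs[(pvDigitsA cs (i + 1) 0).1] = 'm' := by
      rwa [getElem!_pos cs _ hm1] at hm2
    have hdrop1 : cs.drop ((pvDigitsA cs (i + 1) 0).1)
        = 'm' :: cs.drop ((pvDigitsA cs (i + 1) 0).1 + 1) := by
      rw [List.drop_eq_getElem_cons hm1, hm']
    have e2 := pvDigitsA_eq cs ((pvDigitsA cs (i + 1) 0).1 + 1) 0
    have hdw2 : (cs.drop ((pvDigitsA cs (i + 1) 0).1 + 1)).dropWhile PySem.Chars.isdigit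
        = cs.drop ((pvDigitsA cs ((pvDigitsA cs (i + 1) 0).1 + 1) 0).1) := by
      rw [pvDropWhile_eq_drop, List.drop_drop, e2]
    have hnm : pvNextMatch (cs.drop i)
        = some (pvIntOfDigits ((cs.drop (i + 1)).takeWhile PySem.Chars.isdigit) *
                  pvIntOfDigits
                    ((cs.drop ((pvDigitsA cs (i + 1) 0).1 + 1)).takeWhile PySem.Chars.isdigit),
                cs.drop ((pvDigitsA cs ((pvDigitsA cs (i + 1) 0).1 + 1) 0).1)) := by
      rw [List.drop_eq_getElem_cons hi, hb',
        pvNextMatch_cons_b_m _ _ (by rw [hdw, hdrop1]), hdw2]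
    rw [pvLoopB_of_some _ _ _ _ _ _ hnm, if_neg (by omega)]
    show pvLoopB limit (d + 1)
        (total + (pvDigitsA cs (i + 1) 0).2 * (pvDigitsA cs ((pvDigitsA cs (i + 1) 0).1 + 1) 0).2)
        (cs.drop ((pvDigitsA cs ((pvDigitsA cs (i + 1) 0).1 + 1) 0).1)) = _
    rw [e2, e1]
    simp [pvIntOfDigits, pvDigitVal]
  | case2 i total d h hb r1 hm ih =>
    -- 'b' found but no 'm' after the digit run: A continues from the end of the run
    obtain ⟨hi, hd⟩ := h
    replace hm : ¬ ((pvDigitsA cs (i + 1) 0).1 < cs.length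
        ∧ cs[(pvDigitsA cs (i + 1) 0).1]! = 'm') := hm
    rw [ih]
    apply pvLoopB_congr
    have hb' : cs[i] = 'b' := by rwa [getElem!_pos cs i hi] at hb
    have e1 := pvDigitsA_eq cs (i + 1) 0
    have hdw : (cs.drop (i + 1)).dropWhile PySem.Chars.isdigit
        = cs.drop ((pvDigitsA cs (i + 1) 0).1) := by
      rw [pvDropWhile_eq_drop, List.drop_drop, e1]
    have hnotm : ∀ r2, (cs.drop (i + 1)).dropWhile PySem.Chars.isdigit ≠ 'm' :: r2 := by
      intro r2 hcontra
      rw [hdw] at hcontra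
      rcases Nat.lt_or_ge ((pvDigitsA cs (i + 1) 0).1) cs.length with hlt | hge
      · rw [List.drop_eq_getElem_cons hlt] at hcontra
        have hcm : cs[(pvDigitsA cs (i + 1) 0).1] = 'm' := (List.cons.injEq .. ▸ hcontra).1
        exact hm ⟨hlt, by rw [getElem!_pos cs _ hlt, hcm]⟩
      · rw [List.drop_eq_nil_of_le hge] at hcontra
        simp at hcontra
    have hsplit : cs.drop (i + 1)
        = ((cs.drop (i + 1)).takeWhile PySem.Chars.isdigit)
            ++ cs.drop ((pvDigitsA cs (i + 1) 0).1) := by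
      rw [← hdw, List.takeWhile_append_dropWhile]
    show pvNextMatch (cs.drop ((pvDigitsA cs (i + 1) 0).1)) = pvNextMatch (cs.drop i)
    rw [List.drop_eq_getElem_cons hi, hb', pvNextMatch_cons_b_not_m _ hnotm, hsplit,
      pvNextMatch_skip _ _ (fun c hc => pvIsdigit_ne_b c (List.mem_takeWhile_imp hc))]
  | case3 i total d h hb ih =>
    -- current char is not 'b': both sides skip it
    obtain ⟨hi, hd⟩ := h
    rw [ih]
    apply pvLoopB_congr
    have hb' : cs[i] ≠ 'b' := by rwa [getElem!_pos cs i hi] at hb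
    rw [List.drop_eq_getElem_cons hi, pvNextMatch_cons_not_b _ _ hb']
  | case4 i total d h =>
    -- loop exit: out of string or budget exhausted
    rcases Nat.lt_or_ge i cs.length with hi | hi
    · have hd : limit ≤ d := by by_contra hc; exact h ⟨hi, by omega⟩
      rw [pvLoopB_stop _ _ _ _ hd]
    · rw [List.drop_eq_nil_of_le hi]
      exact (pvLoopB_of_none _ _ _ _ rfl).symm

-- ===== VERDICT (by name: the statement is the Claim_ definition above) =====
theorem hitungKorban_spec : Claim_equal_hitungKorban := by
  intro g k _
  unfold Spec_hitungKorban hitungKorban hitungKorban_alt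
  simpa using pvLoop_eq g.toList (PySem.Int.floordiv k 10) 0 0 0
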